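-- pv_equiv track=rewrite | github.com/GStravinsky/GoogleFooBar | 2_2.py | generous_new
-- ===== SOURCE A (Python) =====
-- def generous_new(total_lambs):
--
--     paid_so_far = 0
--     n = 0
--     next_pay = 0
--     while total_lambs >= paid_so_far:
--         n += 1
--         next_pay = 2**(n-1)
--         paid_so_far = paid_so_far+next_pay
--
--     return n-1
-- ===== SOURCE B (Python) =====
-- def generous_new(total_lambs):
--     if total_lambs < 0:
--         return -1
--     return (total_lambs + 1).bit_length() - 1
-- ===== Notes on version B (the rewrite author's own statement) =====
-- stated objective: simpler
-- what changed: The geometric-sum while-loop is replaced by a single closed-form bit_length computation on total_lambs+1, with an explicit guard reproducing the loop's zero-iteration result on negative input.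
import Mathlib
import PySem

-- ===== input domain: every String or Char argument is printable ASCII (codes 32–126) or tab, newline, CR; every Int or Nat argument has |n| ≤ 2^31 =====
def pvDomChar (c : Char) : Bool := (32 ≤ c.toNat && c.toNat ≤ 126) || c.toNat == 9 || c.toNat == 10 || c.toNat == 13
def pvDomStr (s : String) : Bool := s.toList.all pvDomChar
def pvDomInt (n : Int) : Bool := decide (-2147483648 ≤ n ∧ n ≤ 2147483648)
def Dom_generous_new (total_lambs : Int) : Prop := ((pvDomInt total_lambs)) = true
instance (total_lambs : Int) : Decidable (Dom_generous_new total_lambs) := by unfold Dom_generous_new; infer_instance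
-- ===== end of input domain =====

-- B replaces A's geometric-sum while-loop by the closed form bit_length(total_lambs+1)-1 (simpler, no loop).

-- ===== PORT A =====
-- A's while-loop: state (paid_so_far, n); each iteration n += 1; next_pay = 2^(n-1); paid += next_pay.
-- n is kept as a Nat loop counter so the exponent 2^(n-1) (always a non-negative exponent in A) is 2^n of the previous n.
def generousLoop (total_lambs paid_so_far : Int) (n : Nat) : Int :=
  if h : total_lambs ≥ paid_so_far then
    generousLoop total_lambs (paid_so_far + 2 ^ n) (n + 1)
  else
    (n : Int) - 1
  termination_by (total_lambs - paid_so_far + 1).toNat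
  decreasing_by
    have h1 : (1 : Int) ≤ 2 ^ n := one_le_pow₀ (by norm_num)
    generalize (2 : Int) ^ n = p at h1 ⊢
    omega

def generous_new (total_lambs : Int) : Int :=
  generousLoop total_lambs 0 0

-- ===== PORT B =====
-- (total_lambs + 1).bit_length() is Nat.size of the (non-negative) number total_lambs + 1.
def generous_new_alt (total_lambs : Int) : Int :=
  if total_lambs < 0 then -1
  else (Nat.size (total_lambs + 1).toNat : Int) - 1

-- ===== PRECONDITION & SPEC =====
def Spec_generous_new (total_lambs : Int) (out : Int) : Prop := out = generous_new_alt total_lambs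
instance (total_lambs : Int) (out : Int) : Decidable (Spec_generous_new total_lambs out) := by unfold Spec_generous_new; infer_instance

-- ===== CLAIM (what is proved, stated in full; the proofs are below) =====
def Claim_equal_generous_new : Prop := ∀ (total_lambs : Int), Dom_generous_new total_lambs → Spec_generous_new total_lambs (generous_new total_lambs)

-- ===== LEMMAS AND PROOFS =====

lemma size_eq_log2_succ {m : Nat} (hm : 1 ≤ m) : Nat.size m = Nat.log 2 m + 1 := by
  have hs : 1 ≤ Nat.size m := Nat.size_pos.mpr hm
  have hlo : 2 ^ (Nat.size m - 1) ≤ m := Nat.lt_size.mp (by omega)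
  have hhi : m < 2 ^ (Nat.size m) := Nat.lt_size_self m
  have : Nat.log 2 m = Nat.size m - 1 := by
    apply Nat.log_eq_of_pow_le_of_lt_pow hlo
    have : Nat.size m - 1 + 1 = Nat.size m := by omega
    rw [this]; exact hhi
  omega

-- the loop, started with paid_so_far = 2^n - 1, returns log₂(total_lambs + 1)
lemma generousLoop_eq (k : Nat) : ∀ (total_lambs : Int), 0 ≤ total_lambs →
    ∀ n : Nat, (total_lambs + 1).toNat < 2 ^ n + k → (2 : Int) ^ n ≤ total_lambs + 1 →
    generousLoop total_lambs (2 ^ n - 1) n = (Nat.log 2 (total_lambs + 1).toNat : Int) := by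
  induction k with
  | zero =>
    intro t ht n hk hle
    exfalso
    have : ((2 ^ n : Nat) : Int) ≤ t + 1 := by push_cast; exact hle
    omega
  | succ k ih =>
    intro t ht n hk hle
    rw [generousLoop.eq_def]
    have hcond : t ≥ 2 ^ n - 1 := by omega
    rw [dif_pos hcond]
    have hsum : (2 : Int) ^ n - 1 + 2 ^ n = 2 ^ (n + 1) - 1 := by ring
    rw [hsum]
    by_cases hnext : (2 : Int) ^ (n + 1) ≤ t + 1
    · apply ih t ht (n + 1) _ hnext
      have h1 : (1 : Nat) ≤ 2 ^ n := Nat.one_le_two_pow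
      have : 2 ^ (n + 1) = 2 ^ n + 2 ^ n := by ring
      omega
    · rw [generousLoop.eq_def]
      rw [dif_neg (by omega)]
      have hlogn : Nat.log 2 (t + 1).toNat = n := by
        apply Nat.log_eq_of_pow_le_of_lt_pow
        · have : ((2 ^ n : Nat) : Int) ≤ t + 1 := by push_cast; exact hle
          omega
        · have : ¬ (((2 ^ (n + 1) : Nat) : Nat) : Int) ≤ t + 1 := by push_cast at hnext ⊢; exact hnext
          omega
      rw [hlogn]
      push_cast
      ring

-- ===== VERDICT (by name: the statement is the Claim_ definition above) =====
theorem generous_new_spec : Claim_equal_generous_new := by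
  intro t _
  unfold Spec_generous_new generous_new generous_new_alt
  by_cases ht : t < 0
  · rw [generousLoop.eq_def, dif_neg (by omega : ¬ t ≥ 0), if_pos ht]
    norm_num
  · rw [if_neg ht]
    rw [not_lt] at ht
    have h0 : generousLoop t 0 0 = generousLoop t (2 ^ 0 - 1) 0 := by norm_num
    rw [h0, generousLoop_eq ((t + 1).toNat) t ht 0 (by norm_num) (by norm_num; omega)]
    have hm : 1 ≤ (t + 1).toNat := by omega
    rw [size_eq_log2_succ hm]
    push_cast
    ring
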